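-- pv_equiv track=rewrite | github.com/Vincent-Maladiere/assignment1-basics | cs336_basics/train_bpe.py | _make_new_pretoken
-- ===== SOURCE A (Python) =====
-- def _make_new_pretoken(pretoken, pair, new_token_id):
--     """Create the post-merged pretoken and its overlapping pairs.
--
--     This function also handle the edge-case when there are several merges in the same
--     pretoken, e.g. "(a, b, c, a, b)" when merging the pair "(a, b)".
--     """
--     # First, compute the final new pretoken, after all merges, and identify the
--     # prefixes and suffixes before merging. Later, these pre-merging suffixes and
--     # prefixes will allow to decrease the count of pre-merging pairs.
--     new_pretoken = []
--     idx = 0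
--     prefix_suffix = []
--     while idx <= len(pretoken) - 1:
--         if pretoken[idx : idx + 2] == pair:
--             new_pretoken.append(new_token_id)
--             prefix, suffix = pretoken[:idx], pretoken[idx + 2 :]
--             prefix_suffix.append((prefix, suffix))
--             idx += 2
--         else:
--             new_pretoken.append(pretoken[idx])
--             idx += 1
--
--     # Now that we have our merged new_pretoken, we can substitute it to get our
--     # post-merge prefixes and suffixes. We will use these to increase the count
--     # of post-merging pairs.
--     results = []
--     new_pretoken = tuple(new_pretoken)
--     idx = 0
--     while idx <= len(new_pretoken) - 1:
--         if new_pretoken[idx] == new_token_id: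
--             new_prefix, new_suffix = new_pretoken[:idx], new_pretoken[idx + 1 :]
--             new_res = (
--                 new_pretoken,
--                 *prefix_suffix[len(results)],
--                 new_prefix,
--                 new_suffix,
--             )
--             results.append(new_res)
--         idx += 1
--
--     return results
-- ===== SOURCE B (Python) =====
-- def _make_new_pretoken(pretoken, pair, new_token_id):
--     """One pass: record each merge's pre-merge prefix/suffix together with the
--     position the merged token gets in new_pretoken; no second scan needed."""
--     new_pretoken = []
--     recs = []
--     idx = 0
--     n = len(pretoken)
--     while idx < n:
--         if pretoken[idx : idx + 2] == pair:
--             recs.append((pretoken[:idx], pretoken[idx + 2 :], len(new_pretoken)))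
--             new_pretoken.append(new_token_id)
--             idx += 2
--         else:
--             new_pretoken.append(pretoken[idx])
--             idx += 1
--     np_t = tuple(new_pretoken)
--     return [
--         (np_t, prefix, suffix, np_t[:pos], np_t[pos + 1 :])
--         for prefix, suffix, pos in recs
--     ]
-- ===== Notes on version B (the rewrite author's own statement) =====
-- stated objective: simpler
-- what changed: B records each merge's position in new_pretoken during the single merge pass and emits the results from those records, eliminating A's whole second scan over new_pretoken and its result-counter indexing into prefix_suffix.
-- outside the precondition, e.g. on _make_new_pretoken([5, 6], [5, 6], 5): A returns [((5,), (), (), (), ())], B returns [((5,), (), (), (), ())]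
import Mathlib
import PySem

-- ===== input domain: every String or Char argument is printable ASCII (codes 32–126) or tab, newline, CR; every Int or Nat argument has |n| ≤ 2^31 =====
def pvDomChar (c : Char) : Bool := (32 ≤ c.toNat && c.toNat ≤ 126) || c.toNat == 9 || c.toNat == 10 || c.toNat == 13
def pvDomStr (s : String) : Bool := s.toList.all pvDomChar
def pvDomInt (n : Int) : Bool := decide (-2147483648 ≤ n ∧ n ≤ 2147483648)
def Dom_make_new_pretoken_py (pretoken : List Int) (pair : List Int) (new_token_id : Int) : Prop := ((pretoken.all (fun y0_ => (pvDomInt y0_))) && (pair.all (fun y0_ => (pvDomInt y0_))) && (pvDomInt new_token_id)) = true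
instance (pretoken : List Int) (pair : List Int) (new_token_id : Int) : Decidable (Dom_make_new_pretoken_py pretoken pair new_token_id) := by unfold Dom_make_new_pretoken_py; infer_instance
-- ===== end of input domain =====

-- B records each merge's position in new_pretoken during the single merge pass and emits
-- the results from those records, eliminating A's second scan over new_pretoken (objective: simpler).


-- ===== PORT A =====
-- first while loop: build new_pretoken and the pre-merge (prefix, suffix) list.
-- 'idx <= len(pretoken) - 1' on Python ints is 'idx < pretoken.length' for idx ≥ 0.
-- pretoken[idx] is in range (idx < length), ported as getD.
def aLoop1 (pretoken pair : List Int) (new_token_id : Int) (idx : Nat) :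
    List Int × List (List Int × List Int) :=
  if idx < pretoken.length then
    if PySem.List.slice pretoken (some (idx : Int)) (some ((idx : Int) + 2)) == pair then
      let r := aLoop1 pretoken pair new_token_id (idx + 2)
      (new_token_id :: r.1,
        (PySem.List.slice pretoken none (some (idx : Int)),
         PySem.List.slice pretoken (some ((idx : Int) + 2)) none) :: r.2)
    else
      (pretoken.getD idx 0 :: (aLoop1 pretoken pair new_token_id (idx + 1)).1,
       (aLoop1 pretoken pair new_token_id (idx + 1)).2)
  else ([], [])
termination_by pretoken.length - idx

-- second while loop: scan new_pretoken for new_token_id, indexing prefix_suffix by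
-- len(results).  prefix_suffix[len(results)] raises IndexError in Python when out of
-- range; that input is excluded by Pre_ (here getD returns a dummy).
def aLoop2 (np : List Int) (ps : List (List Int × List Int)) (new_token_id : Int)
    (idx : Nat) (results : List (List Int × List Int × List Int × List Int × List Int)) :
    List (List Int × List Int × List Int × List Int × List Int) :=
  if idx < np.length then
    if np.getD idx 0 == new_token_id then
      let pr := ps.getD results.length ([], [])
      aLoop2 np ps new_token_id (idx + 1)
        (results ++ [(np, pr.1, pr.2,
          PySem.List.slice np none (some (idx : Int)),
          PySem.List.slice np (some ((idx : Int) + 1)) none)])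
    else aLoop2 np ps new_token_id (idx + 1) results
  else results
termination_by np.length - idx

def make_new_pretoken_py (pretoken : List Int) (pair : List Int) (new_token_id : Int) :
    List (List Int × List Int × List Int × List Int × List Int) :=
  let r := aLoop1 pretoken pair new_token_id 0
  aLoop2 r.1 r.2 new_token_id 0 []

-- ===== PORT B =====
-- single pass of Source B: 'pos' carries len(new_pretoken) built so far; each matched merge
-- records (prefix, suffix, position-of-merged-token-in-new_pretoken).
def bLoop (pretoken pair : List Int) (new_token_id : Int) (idx pos : Nat) :
    List Int × List (List Int × List Int × Nat) :=
  if idx < pretoken.length then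
    if PySem.List.slice pretoken (some (idx : Int)) (some ((idx : Int) + 2)) == pair then
      let r := bLoop pretoken pair new_token_id (idx + 2) (pos + 1)
      (new_token_id :: r.1,
        (PySem.List.slice pretoken none (some (idx : Int)),
         PySem.List.slice pretoken (some ((idx : Int) + 2)) none, pos) :: r.2)
    else
      (pretoken.getD idx 0 :: (bLoop pretoken pair new_token_id (idx + 1) (pos + 1)).1,
       (bLoop pretoken pair new_token_id (idx + 1) (pos + 1)).2)
  else ([], [])
termination_by pretoken.length - idx

-- the final comprehension: np_t[:pos] / np_t[pos+1:] with pos : Nat are take/drop (exact).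
def make_new_pretoken_py_alt (pretoken : List Int) (pair : List Int) (new_token_id : Int) :
    List (List Int × List Int × List Int × List Int × List Int) :=
  let r := bLoop pretoken pair new_token_id 0 0
  r.2.map (fun t => (r.1, t.1, t.2.1, r.1.take t.2.2, r.1.drop (t.2.2 + 1)))

-- ===== PRECONDITION & SPEC =====
-- Pre_ excludes inputs where new_token_id already occurs in pretoken: whenever such an
-- occurrence survives the merge pass Python A raises IndexError, and in the remaining
-- corner (every occurrence consumed by a merge) A and B in fact return the same value
-- (see the cite), so Pre_ is slightly narrower than its reason.
def Pre_make_new_pretoken_py (pretoken : List Int) (pair : List Int) (new_token_id : Int) : Prop :=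
  new_token_id ∉ pretoken
instance (pretoken : List Int) (pair : List Int) (new_token_id : Int) : Decidable (Pre_make_new_pretoken_py pretoken pair new_token_id) := by unfold Pre_make_new_pretoken_py; infer_instance

def pvWitness_make_new_pretoken_py : List Int × List Int × Int := ([1, 2, 3, 1, 2], [1, 2], 9)

def Spec_make_new_pretoken_py (pretoken : List Int) (pair : List Int) (new_token_id : Int) (out : List (List Int × List Int × List Int × List Int × List Int)) : Prop := out = make_new_pretoken_py_alt pretoken pair new_token_id
instance (pretoken : List Int) (pair : List Int) (new_token_id : Int) (out : List (List Int × List Int × List Int × List Int × List Int)) : Decidable (Spec_make_new_pretoken_py pretoken pair new_token_id out) := by unfold Spec_make_new_pretoken_py; infer_instance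

-- ===== CLAIM (what is proved, stated in full; the proofs are below) =====
def Claim_equal_make_new_pretoken_py : Prop := ∀ (pretoken : List Int) (pair : List Int) (new_token_id : Int), Dom_make_new_pretoken_py pretoken pair new_token_id → Pre_make_new_pretoken_py pretoken pair new_token_id → Spec_make_new_pretoken_py pretoken pair new_token_id (make_new_pretoken_py pretoken pair new_token_id)

-- ===== LEMMAS AND PROOFS =====

-- positions ≥ idx at which np holds new_token_id
def occs (np : List Int) (nt : Int) (idx : Nat) : List Nat :=
  if idx < np.length then
    if np.getD idx 0 == nt then idx :: occs np nt (idx + 1) else occs np nt (idx + 1)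
  else []
termination_by np.length - idx

-- the results A's second loop produces from a list of occurrence positions, with the
-- prefix_suffix counter starting at k
def mk (np : List Int) (ps : List (List Int × List Int)) (nt : Int) :
    List Nat → Nat → List (List Int × List Int × List Int × List Int × List Int)
  | [], _ => []
  | q :: qs, k =>
      let pr := ps.getD k ([], [])
      (np, pr.1, pr.2, np.take q, np.drop (q + 1)) :: mk np ps nt qs (k + 1)

theorem cast_add_one (idx : Nat) : ((idx : Int) + 1) = ((idx + 1 : Nat) : Int) := by
  push_cast; ring

theorem pvGetD_mem {α : Type} [Inhabited α] (l : List α) (i : Nat) (d : α) (h : i < l.length) :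
    l.getD i d ∈ l := by
  rw [List.getD_eq_getElem?_getD, List.getElem?_eq_getElem h]
  exact List.getElem_mem h

theorem occs_of_ge (np : List Int) (nt : Int) (idx : Nat) (h : np.length ≤ idx) :
    occs np nt idx = [] := by
  rw [occs, if_neg (by omega)]

theorem aLoop2_eq_mk (np : List Int) (ps : List (List Int × List Int)) (nt : Int)
    (idx : Nat) (acc : List (List Int × List Int × List Int × List Int × List Int)) :
    aLoop2 np ps nt idx acc = acc ++ mk np ps nt (occs np nt idx) acc.length := by
  fun_induction occs np nt idx generalizing acc with
  | case1 idx h hn ih =>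
      rw [aLoop2, if_pos h, if_pos hn, mk, PySem.List.slice_to_natCast,
        cast_add_one idx, PySem.List.slice_from_natCast, ih]
      simp
  | case2 idx h hn ih =>
      rw [aLoop2, if_pos h, if_neg hn, ih]
  | case3 idx h =>
      rw [aLoop2, if_neg h]
      simp [mk]

theorem bLoop_fst (pt pair : List Int) (nt : Int) (idx pos : Nat) :
    (bLoop pt pair nt idx pos).1 = (aLoop1 pt pair nt idx).1 := by
  fun_induction bLoop pt pair nt idx pos with
  | case1 idx pos h hm r ih => rw [aLoop1, if_pos h, if_pos hm]; simpa [r] using ih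
  | case2 idx pos h hm ih => rw [aLoop1, if_pos h, if_neg hm]; simpa using ih
  | case3 idx pos h => rw [aLoop1, if_neg h]

-- main invariant: mapping B's records gives exactly A's mk over the occurrence positions,
-- provided FULL agrees with the tail new_pretoken from position pos on, PS agrees with
-- the tail prefix_suffix from counter k on, and nt never occurs in pretoken.
theorem bLoop_mk (pt pair : List Int) (nt : Int) (hnt : nt ∉ pt)
    (idx pos k : Nat) (FULL : List Int) (PS : List (List Int × List Int))
    (hF : FULL.drop pos = (aLoop1 pt pair nt idx).1)
    (hP : PS.drop k = (aLoop1 pt pair nt idx).2) :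
    (bLoop pt pair nt idx pos).2.map
        (fun t => (FULL, t.1, t.2.1, FULL.take t.2.2, FULL.drop (t.2.2 + 1)))
      = mk FULL PS nt (occs FULL nt pos) k := by
  fun_induction bLoop pt pair nt idx pos generalizing k FULL PS with
  | case1 idx pos h hm r ih =>
      rw [aLoop1, if_pos h, if_pos hm] at hF hP
      have hpos : pos < FULL.length := by
        by_contra hc
        rw [List.drop_eq_nil_of_le (by omega)] at hF
        exact List.cons_ne_nil _ _ hF.symm
      have h0 : FULL[pos]? = some nt := by
        have := congrArg (fun l => l[0]?) hF
        simpa [List.getElem?_drop] using this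
      have hget : FULL.getD pos 0 = nt := by
        simp [List.getD_eq_getElem?_getD, h0]
      have hps0 : PS[k]? = some (PySem.List.slice pt none (some (idx : Int)),
          PySem.List.slice pt (some ((idx : Int) + 2)) none) := by
        have := congrArg (fun l => l[0]?) hP
        simpa [List.getElem?_drop] using this
      have hps : PS.getD k ([], []) =
          (PySem.List.slice pt none (some (idx : Int)),
           PySem.List.slice pt (some ((idx : Int) + 2)) none) := by
        simp [List.getD_eq_getElem?_getD, hps0]
      rw [occs, if_pos hpos, if_pos (by simpa using hget), mk]
      simp only [r, List.map_cons]
      rw [ih (k + 1) FULL PS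
        (by have := congrArg List.tail hF; simpa [List.tail_drop] using this)
        (by have := congrArg List.tail hP; simpa [List.tail_drop] using this)]
      simp [hps0, PySem.List.slice_to_natCast]
  | case2 idx pos h hm ih =>
      rw [aLoop1, if_pos h, if_neg hm] at hF hP
      have hpos : pos < FULL.length := by
        by_contra hc
        rw [List.drop_eq_nil_of_le (by omega)] at hF
        exact List.cons_ne_nil _ _ hF.symm
      have h0 : FULL[pos]? = some (pt.getD idx 0) := by
        have := congrArg (fun l => l[0]?) hF
        simpa [List.getElem?_drop] using this
      have hget : FULL.getD pos 0 = pt.getD idx 0 := by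
        simp [List.getD_eq_getElem?_getD, h0]
      have hne : ¬ (FULL.getD pos 0 == nt) = true := by
        simp only [beq_iff_eq, hget]
        intro hEq
        exact hnt (hEq ▸ pvGetD_mem pt idx 0 h)
      rw [occs, if_pos hpos, if_neg hne]
      exact ih k FULL PS
        (by have := congrArg List.tail hF; simpa [List.tail_drop] using this) hP
  | case3 idx pos h =>
      rw [aLoop1, if_neg h] at hF
      have hge : FULL.length ≤ pos := by
        by_contra hc
        have hne : FULL.drop pos ≠ [] := by
          simp [List.drop_eq_nil_iff]; omega
        exact hne hF
      rw [occs_of_ge FULL nt pos hge]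
      simp [mk]

-- ===== VERDICT (by name: the statement is the Claim_ definition above) =====
theorem make_new_pretoken_py_spec : Claim_equal_make_new_pretoken_py := by
  intro pt pair nt _ hpre
  unfold Spec_make_new_pretoken_py make_new_pretoken_py make_new_pretoken_py_alt
  simp only [bLoop_fst]
  rw [aLoop2_eq_mk]
  simpa using (bLoop_mk pt pair nt hpre 0 0 0 (aLoop1 pt pair nt 0).1
    (aLoop1 pt pair nt 0).2 (by simp) (by simp)).symm
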